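-- pv_equiv track=rewrite | github.com/Anuj2004jain/Smart-Translator | new/test3.py | match_phrases
-- ===== SOURCE A (Python) =====
-- def match_phrases(sentence, dictionary):
--     words = sentence.lower().split()
--     matched_phrases = []
--     i = 0
--     while i < len(words):
--         match_found = False
--         for j in range(len(words), i, -1):
--             phrase = " ".join(words[i:j])
--             if phrase in dictionary:
--                 matched_phrases.append((phrase, dictionary[phrase]))
--                 i = j - 1
--                 match_found = True
--                 break
--         if not match_found:
--             word = words[i]
--             matched_phrases.append((word, dictionary.get(word, {"word": word, "pos": "Unknown"})))
--         i += 1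
--     return matched_phrases
-- ===== SOURCE B (Python) =====
-- def match_phrases(sentence, dictionary):
--     words = sentence.lower().split()
--     max_chars = max(map(len, dictionary), default=-1)
--     matched_phrases = []
--     i = 0
--     n = len(words)
--     while i < n:
--         phrase = ""
--         best = None
--         for k in range(i, n):
--             phrase = words[k] if k == i else phrase + " " + words[k]
--             if len(phrase) > max_chars:
--                 break
--             if phrase in dictionary:
--                 best = (phrase, k + 1)
--         if best is None:
--             w = words[i]
--             matched_phrases.append((w, dictionary.get(w, {"word": w, "pos": "Unknown"})))
--             i += 1
--         else:
--             p, j = best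
--             matched_phrases.append((p, dictionary[p]))
--             i = j
--     return matched_phrases
-- ===== Notes on version B (the rewrite author's own statement) =====
-- stated objective: alternative
-- what changed: Instead of re-joining words[i:j] for every j in a backward scan at each position, B precomputes the maximum dictionary-key character length once and does a forward scan per position that extends the candidate phrase incrementally, stops as soon as the phrase is longer than any key, and keeps the last (longest) hit.
import Mathlib
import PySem

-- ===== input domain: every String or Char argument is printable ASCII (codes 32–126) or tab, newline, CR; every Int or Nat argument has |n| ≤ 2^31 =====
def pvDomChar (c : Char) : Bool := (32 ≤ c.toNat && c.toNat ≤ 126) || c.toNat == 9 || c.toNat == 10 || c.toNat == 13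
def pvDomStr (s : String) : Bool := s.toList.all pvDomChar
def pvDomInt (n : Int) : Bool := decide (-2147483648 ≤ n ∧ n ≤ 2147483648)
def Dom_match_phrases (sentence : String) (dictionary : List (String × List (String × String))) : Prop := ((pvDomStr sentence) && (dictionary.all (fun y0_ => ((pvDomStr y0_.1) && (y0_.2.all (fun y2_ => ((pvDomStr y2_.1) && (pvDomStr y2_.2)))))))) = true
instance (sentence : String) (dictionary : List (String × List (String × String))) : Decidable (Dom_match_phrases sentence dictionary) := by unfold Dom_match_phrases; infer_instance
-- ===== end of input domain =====

-- B replaces A's backward re-join scan at each position by a forward incremental phrase build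
-- bounded by the longest dictionary key's character length; the return values are proved equal.

-- ===== PORT A =====
-- phrase = " ".join(words[i:j])
def pvJoinSlice (words : List String) (i j : Nat) : String :=
  PySem.Str.join " " (PySem.List.slice words (some (Int.ofNat i)) (some (Int.ofNat j)))

-- inner 'for j in range(len(words), i, -1): … break' — first (largest) j with a dictionary hit
def pvAFind (d : PySem.Dict String (List (String × String))) (words : List String) (i : Nat) : Nat → Option Nat
  | 0 => none
  | j + 1 =>
    if i < j + 1 then
      if d.contains (pvJoinSlice words i (j + 1)) then some (j + 1)
      else pvAFind d words i j
    else none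

-- outer 'while i < len(words)' loop (fuel = an upper bound on the iteration count)
def pvALoop (d : PySem.Dict String (List (String × String))) (words : List String) :
    Nat → Nat → List (String × List (String × String))
  | 0, _ => []
  | fuel + 1, i =>
    if i < words.length then
      match pvAFind d words i words.length with
      | some j =>
        (pvJoinSlice words i j, (d.get? (pvJoinSlice words i j)).getD []) :: pvALoop d words fuel j
      | none =>
        let w := (PySem.List.pyGet? words (Int.ofNat i)).getD ""
        (w, d.getD w [("word", w), ("pos", "Unknown")]) :: pvALoop d words fuel (i + 1)
    else []

def match_phrases (sentence : String) (dictionary : List (String × List (String × String))) : List (String × (List (String × String))) :=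
  let words := PySem.Str.split₀ (PySem.Str.lower sentence)
  pvALoop (PySem.Dict.mk dictionary) words words.length 0

-- ===== PORT B =====
-- inner 'for k in range(i, n): … break' of B — build phrase incrementally, remember the last (longest) hit
def pvBScan (d : PySem.Dict String (List (String × String))) (maxChars : Int) (words : List String)
    (i : Nat) (k : Nat) (phrase : String) (best : Option (String × Nat)) : Option (String × Nat) :=
  if h : k < words.length then
    let w := (PySem.List.pyGet? words (Int.ofNat k)).getD ""
    let phrase' := if k = i then w else phrase ++ " " ++ w
    if maxChars < PySem.Str.len phrase' then best
    else pvBScan d maxChars words i (k + 1) phrase'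
      (if d.contains phrase' then some (phrase', k + 1) else best)
  else best
termination_by words.length - k

-- outer 'while i < n' loop of B
def pvBLoop (d : PySem.Dict String (List (String × String))) (maxChars : Int) (words : List String) :
    Nat → Nat → List (String × List (String × String))
  | 0, _ => []
  | fuel + 1, i =>
    if i < words.length then
      match pvBScan d maxChars words i i "" none with
      | none =>
        let w := (PySem.List.pyGet? words (Int.ofNat i)).getD ""
        (w, d.getD w [("word", w), ("pos", "Unknown")]) :: pvBLoop d maxChars words fuel (i + 1)
      | some (p, j) =>
        (p, (d.get? p).getD []) :: pvBLoop d maxChars words fuel j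
    else []

def match_phrases_alt (sentence : String) (dictionary : List (String × List (String × String))) : List (String × (List (String × String))) :=
  let words := PySem.Str.split₀ (PySem.Str.lower sentence)
  let d := PySem.Dict.mk dictionary
  let maxChars := PySem.List.maxD (d.keys.map PySem.Str.len) (fun x => x) (-1)
  pvBLoop d maxChars words words.length 0

-- ===== PRECONDITION & SPEC =====
def Spec_match_phrases (sentence : String) (dictionary : List (String × List (String × String))) (out : List (String × (List (String × String)))) : Prop := out = match_phrases_alt sentence dictionary
instance (sentence : String) (dictionary : List (String × List (String × String))) (out : List (String × (List (String × String)))) : Decidable (Spec_match_phrases sentence dictionary out) := by unfold Spec_match_phrases; infer_instance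

-- ===== CLAIM (what is proved, stated in full; the proofs are below) =====
def Claim_equal_match_phrases : Prop := ∀ (sentence : String) (dictionary : List (String × List (String × String))), Dom_match_phrases sentence dictionary → Spec_match_phrases sentence dictionary (match_phrases sentence dictionary)

-- ===== LEMMAS AND PROOFS =====

-- words[k] (total form used by both ports) is the real k-th word when k < length
theorem pvWordGet (words : List String) (k : Nat) (h : k < words.length) :
    (PySem.List.pyGet? words (Int.ofNat k)).getD "" = words[k] := by
  simp [Int.ofNat_eq_natCast, PySem.List.pyGet?_natCast, List.getElem?_eq_getElem h]

-- " ".join chars-level: join sep ((a::l) ++ [w]) = join sep (a::l) ++ sep ++ w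
theorem pvCharsJoinAppend (sep w : List Char) : ∀ (l : List (List Char)) (a : List Char),
    PySem.Chars.join sep ((a :: l) ++ [w]) = PySem.Chars.join sep (a :: l) ++ sep ++ w
  | [], a => by
    simp [PySem.Chars.join_cons_cons, PySem.Chars.join_singleton]
  | b :: t, a => by
    have h1 : (a :: b :: t) ++ [w] = a :: b :: (t ++ [w]) := by simp
    rw [h1, PySem.Chars.join_cons_cons, ← List.cons_append, pvCharsJoinAppend sep w t b,
      PySem.Chars.join_cons_cons]
    simp [List.append_assoc]

-- " ".join(ws ++ [w]) = " ".join(ws) + " " + w  (ws nonempty)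
theorem pvJoinAppend (ws : List String) (w : String) (hne : ws ≠ []) :
    PySem.Str.join " " (ws ++ [w]) = PySem.Str.join " " ws ++ " " ++ w := by
  apply String.ext
  simp only [PySem.Str.toList_join, String.toList_append, List.map_append, List.map_cons, List.map_nil]
  cases ws with
  | nil => exact absurd rfl hne
  | cons a t => exact pvCharsJoinAppend " ".toList w.toList (t.map String.toList) a.toList

-- the slice words[i:j] in natural bounds
theorem pvSliceEq (words : List String) (i j : Nat) :
    PySem.List.slice words (some (Int.ofNat i)) (some (Int.ofNat j)) = (words.drop i).take (j - i) := by
  simp [Int.ofNat_eq_natCast, PySem.List.slice_natCast]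

-- incremental build: join(words[i:k+1]) from join(words[i:k])
theorem pvJoinStep (words : List String) (i k : Nat) (hik : i ≤ k) (hk : k < words.length) :
    pvJoinSlice words i (k + 1) =
      if k = i then words[k] else pvJoinSlice words i k ++ " " ++ words[k] := by
  unfold pvJoinSlice
  rw [pvSliceEq, pvSliceEq]
  by_cases hki : k = i
  · subst hki
    have : (words.drop k).take (k + 1 - k) = [words[k]] := by
      have h1 : k + 1 - k = 1 := by omega
      rw [h1, List.take_one, List.head?_eq_getElem?, List.getElem?_drop, Nat.add_zero,
        List.getElem?_eq_getElem hk]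
      rfl
    rw [this]
    apply String.ext
    simp [PySem.Str.toList_join, PySem.Chars.join_singleton]
  · simp only [if_neg hki]
    have hik' : i < k := lt_of_le_of_ne hik (fun h => hki h.symm)
    have h1 : (words.drop i).take (k + 1 - i) = (words.drop i).take (k - i) ++ [words[k]] := by
      have hs : k + 1 - i = (k - i) + 1 := by omega
      rw [hs, List.take_add_one]
      have hget : (words.drop i)[k - i]? = some words[k] := by
        rw [List.getElem?_drop]
        have : i + (k - i) = k := by omega
        rw [this, List.getElem?_eq_getElem hk]
      rw [hget]
      simp
    rw [h1]
    apply pvJoinAppend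
    intro hnil
    have := congrArg List.length hnil
    simp at this
    omega

-- joined phrases only get longer as j grows
theorem pvJoinLenMono (words : List String) (i k j : Nat) (hik : i < k) (hkj : k ≤ j)
    (hj : j ≤ words.length) :
    PySem.Str.len (pvJoinSlice words i k) ≤ PySem.Str.len (pvJoinSlice words i j) := by
  induction j with
  | zero => omega
  | succ m ih =>
    rcases Nat.lt_or_ge k (m + 1) with hlt | hge
    · have hkm : k ≤ m := by omega
      have h1 := ih (by omega) (by omega)
      have h2 : PySem.Str.len (pvJoinSlice words i m) ≤ PySem.Str.len (pvJoinSlice words i (m + 1)) := by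
        rw [pvJoinStep words i m (by omega) (by omega)]
        have hmi : ¬ (m = i) := by omega
        rw [if_neg hmi]
        simp only [PySem.Str.len_eq, String.toList_append]
        simp
        omega
      omega
    · have : k = m + 1 := by omega
      subst this
      exact le_refl _

-- pvAFind only looks below its bound: if everything in (k, m] misses, the bound can be lowered
theorem pvAFindExt (d : PySem.Dict String (List (String × String))) (words : List String)
    (i k : Nat) : ∀ m, k ≤ m →
    (∀ j, k < j → j ≤ m → d.contains (pvJoinSlice words i j) = false) →
    pvAFind d words i m = pvAFind d words i k := by
  intro m
  induction m with
  | zero =>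
    intro h _
    have hk0 : k = 0 := by omega
    subst hk0
    rfl
  | succ m ih =>
    intro hkm hmiss
    rcases Nat.lt_or_ge k (m + 1) with hlt | hge
    · show pvAFind d words i (m + 1) = _
      rw [pvAFind]
      have hm : d.contains (pvJoinSlice words i (m + 1)) = false := hmiss (m + 1) hlt (le_refl _)
      by_cases hi : i < m + 1
      · rw [if_pos hi, hm]
        simp only [Bool.false_eq_true, if_false]
        exact ih (by omega) (fun j h1 h2 => hmiss j h1 (by omega))
      · rw [if_neg hi]
        have hk0 : pvAFind d words i k = none := by
          cases hk : k with
          | zero => rw [pvAFind]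
          | succ k' => rw [pvAFind, if_neg (by omega)]
        rw [hk0]
    · have hkm1 : k = m + 1 := by omega
      subst hkm1
      rfl

-- pvAFind at bound i (empty range) is none
theorem pvAFindBase (d : PySem.Dict String (List (String × String))) (words : List String) (i : Nat) :
    pvAFind d words i i = none := by
  cases i with
  | zero => rw [pvAFind]
  | succ k => rw [pvAFind, if_neg (by omega)]

-- the scan invariant: B's forward scan from k computes A's backward search over the whole range
theorem pvScanInv (d : PySem.Dict String (List (String × String))) (maxChars : Int)
    (words : List String) (i : Nat)
    (hbound : ∀ s, d.contains s = true → PySem.Str.len s ≤ maxChars) :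
    ∀ rem k phrase best, words.length - k = rem → i ≤ k → k ≤ words.length →
    (i < k → phrase = pvJoinSlice words i k) →
    best = (pvAFind d words i k).map (fun j => (pvJoinSlice words i j, j)) →
    pvBScan d maxChars words i k phrase best =
      (pvAFind d words i words.length).map (fun j => (pvJoinSlice words i j, j)) := by
  intro rem
  induction rem with
  | zero =>
    intro k phrase best hrem hik hkn _ hbest
    have hk : k = words.length := by omega
    rw [pvBScan, dif_neg (by omega), hbest, hk]
  | succ r ih =>
    intro k phrase best hrem hik hkn hphrase hbest
    have hklt : k < words.length := by omega
    rw [pvBScan, dif_pos hklt]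
    simp only
    rw [pvWordGet words k hklt]
    have hphrase' : (if k = i then words[k] else phrase ++ " " ++ words[k]) = pvJoinSlice words i (k + 1) := by
      rw [pvJoinStep words i k hik hklt]
      by_cases hki : k = i
      · rw [if_pos hki, if_pos hki]
      · rw [if_neg hki, if_neg hki, hphrase (by omega)]
    rw [hphrase']
    by_cases hbreak : maxChars < PySem.Str.len (pvJoinSlice words i (k + 1))
    · rw [if_pos hbreak, hbest]
      congr 1
      symm
      apply pvAFindExt d words i k words.length hkn
      intro j h1 h2
      by_contra hc
      have hcon : d.contains (pvJoinSlice words i j) = true := by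
        cases h : d.contains (pvJoinSlice words i j)
        · exact absurd h hc
        · rfl
      have hle := hbound _ hcon
      have hmono := pvJoinLenMono words i (k + 1) j (by omega) (by omega) h2
      omega
    · rw [if_neg hbreak]
      refine ih (k + 1) (pvJoinSlice words i (k + 1)) _ (by omega) (by omega) (by omega)
        (fun _ => rfl) ?_
      rw [pvAFind, if_pos (show i < k + 1 by omega)]
      cases hcc : d.contains (pvJoinSlice words i (k + 1))
      · simp [hbest]
      · simp

-- every dictionary key is at most maxChars long
theorem pvMaxCharsBound (dictionary : List (String × List (String × String))) (s : String)
    (hc : (PySem.Dict.mk dictionary).contains s = true) :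
    PySem.Str.len s ≤ PySem.List.maxD ((PySem.Dict.mk dictionary).keys.map PySem.Str.len) (fun x => x) (-1) := by
  have hmem : s ∈ (PySem.Dict.mk dictionary).keys := (PySem.Dict.contains_iff_mem_keys _ _).mp hc
  exact PySem.List.le_maxD_id _ _ _ (List.mem_map_of_mem hmem)

-- the two outer loops agree
theorem pvLoopEq (d : PySem.Dict String (List (String × String))) (maxChars : Int)
    (words : List String)
    (hbound : ∀ s, d.contains s = true → PySem.Str.len s ≤ maxChars) :
    ∀ fuel i, pvALoop d words fuel i = pvBLoop d maxChars words fuel i := by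
  intro fuel
  induction fuel with
  | zero => intro i; rfl
  | succ f ih =>
    intro i
    rw [pvALoop, pvBLoop]
    by_cases hi : i < words.length
    · rw [if_pos hi, if_pos hi]
      have hscan : pvBScan d maxChars words i i "" none =
          (pvAFind d words i words.length).map (fun j => (pvJoinSlice words i j, j)) := by
        apply pvScanInv d maxChars words i hbound (words.length - i) i "" none rfl (le_refl i)
          (by omega) (fun h => absurd h (lt_irrefl i))
        rw [pvAFindBase]
        rfl
      rw [hscan]
      cases hfind : pvAFind d words i words.length with
      | none => simp only [Option.map_none]; rw [ih]
      | some j => simp only [Option.map_some]; rw [ih]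
    · rw [if_neg hi, if_neg hi]

-- ===== VERDICT (by name: the statement is the Claim_ definition above) =====
theorem match_phrases_spec : Claim_equal_match_phrases := by
  intro sentence dictionary _
  show match_phrases sentence dictionary = match_phrases_alt sentence dictionary
  unfold match_phrases match_phrases_alt
  exact pvLoopEq _ _ _ (fun s hc => pvMaxCharsBound dictionary s hc) _ 0
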